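-- pv_equiv track=rewrite | github.com/Aru9/codilityExercisesPython | CodilityExercises/ExamQuestions/ShortestSubstringh.py | solution_easier
-- ===== SOURCE A (Python) =====
-- from collections import Counter
--
-- def solution_easier(S):
--     n = len(S)
--     if n == 1:
--         return 1
--
--     for length in range(1, n + 1):
--         substrings = [S[i : i + length] for i in range(n - length + 1)]
--         counts = Counter(substrings)
--         for sub, count in counts.items():
--             if count == 1:
--                 return length
--
--     return n
-- ===== SOURCE B (Python) =====
-- def solution_easier(S):
--     # Shortest length L such that some substring of length L occurs exactly once.
--     # Instead of counting all substrings per candidate length, compute for each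
--     # start i the longest match of suffix i against any other suffix (LCE scan);
--     # a unique substring starting at i then has length exactly m+1 (if it fits),
--     # and the answer is the minimum such length over all starts.
--     n = len(S)
--     best = n
--     for i in range(n):
--         m = 0
--         for j in range(n):
--             if j == i:
--                 continue
--             k = 0
--             while i + k < n and j + k < n and S[i + k] == S[j + k]:
--                 k += 1
--             if k > m:
--                 m = k
--         if m + 1 <= n - i:
--             best = min(best, m + 1)
--     return best
-- ===== Notes on version B (the rewrite author's own statement) =====
-- stated objective: alternative
-- what changed: Replaced the per-length enumeration of all substrings with a Counter by a single pass over starting positions that computes, via direct character comparison, the longest common extension of each suffix with every other suffix and takes the minimum fitting match-length+1.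
import Mathlib
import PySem

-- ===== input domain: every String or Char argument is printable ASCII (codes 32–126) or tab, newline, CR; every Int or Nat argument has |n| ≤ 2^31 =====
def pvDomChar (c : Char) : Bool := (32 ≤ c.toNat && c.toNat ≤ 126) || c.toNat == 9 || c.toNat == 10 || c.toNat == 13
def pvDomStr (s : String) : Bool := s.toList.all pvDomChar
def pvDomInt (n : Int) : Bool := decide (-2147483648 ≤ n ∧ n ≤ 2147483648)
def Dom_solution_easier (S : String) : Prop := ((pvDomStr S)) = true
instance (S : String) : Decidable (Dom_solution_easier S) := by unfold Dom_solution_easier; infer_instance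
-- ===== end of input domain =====

-- B replaces A's per-length substring Counter by a one-pass longest-common-extension scan
-- over starting positions (objective: alternative algorithm, similar cost).

-- ===== PORT A =====
-- condition of A's inner 'for sub, count in counts.items(): if count == 1: return length'
def aCond (l : List Char) (n : Nat) (L : Int) : Bool :=
  let subs := (PySem.List.pyRange 0 ((n : Int) - L + 1) 1).map
      (fun i => PySem.List.slice l (some i) (some (i + L)))
  let counts := PySem.Dict.counter subs
  counts.items.any (fun p => p.2 == 1)

-- 'for length in range(1, n + 1): … return length' as recursion over the range list
def aLoop (l : List Char) (n : Nat) : List Int → Option Int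
  | [] => none
  | L :: rest => if aCond l n L then some L else aLoop l n rest

def solution_easier (S : String) : Int :=
  let l := S.toList
  let n := l.length
  if n = 1 then 1
  else
    match aLoop l n (PySem.List.pyRange 1 ((n : Int) + 1) 1) with
    | some L => L
    | none => (n : Int)

-- ===== PORT B =====
-- 'k = 0; while i+k < n and j+k < n and S[i+k] == S[j+k]: k += 1'
def lcpAux (l : List Char) (i j k : Nat) : Nat :=
  if i + k < l.length ∧ j + k < l.length ∧ l[i + k]? = l[j + k]? then
    lcpAux l i j (k + 1)
  else k
termination_by l.length - (i + k)
decreasing_by omega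

-- inner 'for j in range(n): if j == i: continue; …; if k > m: m = k'
def bInner (l : List Char) (i : Nat) : Nat :=
  (List.range l.length).foldl
    (fun m j =>
      if j = i then m
      else
        let k := lcpAux l i j 0
        if m < k then k else m) 0

def solution_easier_alt (S : String) : Int :=
  let l := S.toList
  let n := l.length
  ((List.range n).foldl
    (fun best i =>
      let m := bInner l i
      if m + 1 ≤ n - i then min best (m + 1) else best) n : Nat)

-- ===== PRECONDITION & SPEC =====
def Spec_solution_easier (S : String) (out : Int) : Prop := out = solution_easier_alt S
instance (S : String) (out : Int) : Decidable (Spec_solution_easier S out) := by unfold Spec_solution_easier; infer_instance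

-- ===== CLAIM (what is proved, stated in full; the proofs are below) =====
def Claim_equal_solution_easier : Prop := ∀ (S : String), Dom_solution_easier S → Spec_solution_easier S (solution_easier S)

-- ===== LEMMAS AND PROOFS =====

def lcp : List Char → List Char → Nat
  | a :: as, b :: bs => if a = b then lcp as bs + 1 else 0
  | _, _ => 0

theorem lcp_le_right (a b : List Char) : lcp a b ≤ b.length := by
  induction a generalizing b with
  | nil => cases b <;> simp [lcp]
  | cons x as ih =>
    cases b with
    | nil => simp [lcp]
    | cons y bs =>
      simp only [lcp, List.length_cons]
      split_ifs
      · have := ih bs; omega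
      · omega

theorem take_eq_of_le_lcp {a b : List Char} {L : Nat} (h : L ≤ lcp a b) :
    a.take L = b.take L := by
  induction a generalizing b L with
  | nil => cases b <;> simp_all [lcp]
  | cons x as ih =>
    cases b with
    | nil => simp_all [lcp]
    | cons y bs =>
      cases L with
      | zero => simp
      | succ L =>
        simp only [lcp] at h
        split_ifs at h with hxy
        · subst hxy
          simp only [List.take_succ_cons]
          rw [ih (b := bs) (L := L) (by omega)]
        · omega

theorem le_lcp_of_take_eq {a b : List Char} {L : Nat} (ha : L ≤ a.length)
    (hb : L ≤ b.length) (h : a.take L = b.take L) : L ≤ lcp a b := by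
  induction a generalizing b L with
  | nil => simp at ha; omega
  | cons x as ih =>
    cases b with
    | nil => simp at hb; omega
    | cons y bs =>
      cases L with
      | zero => omega
      | succ L =>
        simp only [List.take_succ_cons, List.cons.injEq] at h
        simp only [List.length_cons] at ha hb
        simp only [lcp]
        rw [if_pos h.1]
        have := ih (b := bs) (L := L) (by omega) (by omega) h.2
        omega

theorem lcp_nil_right (a : List Char) : lcp a [] = 0 := by cases a <;> simp [lcp]

theorem lcpAux_eq (l : List Char) (i j k : Nat) :
    lcpAux l i j k = k + lcp (l.drop (i + k)) (l.drop (j + k)) := by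
  fun_induction lcpAux l i j k with
  | case1 k h ih =>
    obtain ⟨hi, hj, he⟩ := h
    rw [ih]
    simp only [show i + (k + 1) = i + k + 1 from rfl, show j + (k + 1) = j + k + 1 from rfl]
    rw [List.drop_eq_getElem_cons hi, List.drop_eq_getElem_cons hj]
    have hxy : l[i + k] = l[j + k] := by
      have := he
      simp [hi, hj] at this
      exact this
    simp only [lcp, if_pos hxy]
    omega
  | case2 k h =>
    have : lcp (l.drop (i + k)) (l.drop (j + k)) = 0 := by
      by_cases hi : i + k < l.length
      · by_cases hj : j + k < l.length
        · have hne : l[i + k] ≠ l[j + k] := by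
            intro hcontra
            exact h ⟨hi, hj, by simp [hi, hj, hcontra]⟩
          rw [List.drop_eq_getElem_cons hi, List.drop_eq_getElem_cons hj]
          simp [lcp, hne]
        · rw [List.drop_eq_nil_of_le (show l.length ≤ j + k by omega)]
          exact lcp_nil_right _
      · rw [List.drop_eq_nil_of_le (show l.length ≤ i + k by omega)]
        simp [lcp]
    omega

-- clean forms of the substring / uniqueness notions
def subL (l : List Char) (i L : Nat) : List Char := (l.drop i).take L

def uniqueAt (l : List Char) (i L : Nat) : Prop :=
  i + L ≤ l.length ∧ ∀ j, j + L ≤ l.length → j ≠ i → subL l j L ≠ subL l i L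

def hasUnique (l : List Char) (L : Nat) : Prop := ∃ i, uniqueAt l i L

-- B's inner fold is the maximum of lcp with the other suffixes
theorem foldmax_ge_init (k : Nat → Nat) (i : Nat) (xs : List Nat) (m : Nat) :
    m ≤ xs.foldl (fun m j => if j = i then m else if m < k j then k j else m) m := by
  induction xs generalizing m with
  | nil => simp
  | cons x xs ih =>
    simp only [List.foldl_cons]
    refine le_trans ?_ (ih _)
    split_ifs <;> omega

theorem foldmax_ge (k : Nat → Nat) (i : Nat) (xs : List Nat) (m : Nat) {j : Nat}
    (hj : j ∈ xs) (hne : j ≠ i) :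
    k j ≤ xs.foldl (fun m j => if j = i then m else if m < k j then k j else m) m := by
  induction xs generalizing m with
  | nil => simp at hj
  | cons x xs ih =>
    simp only [List.foldl_cons]
    rcases List.mem_cons.mp hj with rfl | hj'
    · refine le_trans ?_ (foldmax_ge_init k i xs _)
      simp only [if_neg hne]
      split_ifs <;> omega
    · exact ih _ hj'

theorem foldmax_le (k : Nat → Nat) (i : Nat) (xs : List Nat) (m c : Nat)
    (hm : m ≤ c) (h : ∀ j ∈ xs, j ≠ i → k j ≤ c) :
    xs.foldl (fun m j => if j = i then m else if m < k j then k j else m) m ≤ c := by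
  induction xs generalizing m with
  | nil => simpa
  | cons x xs ih =>
    simp only [List.foldl_cons]
    refine ih _ ?_ (fun j hj hne => h j (List.mem_cons_of_mem _ hj) hne)
    split_ifs with h1 h2
    · exact hm
    · exact h x List.mem_cons_self h1
    · exact hm

theorem bInner_ge (l : List Char) (i : Nat) {j : Nat} (hj : j < l.length) (hne : j ≠ i) :
    lcp (l.drop i) (l.drop j) ≤ bInner l i := by
  have := foldmax_ge (fun j => lcpAux l i j 0) i (List.range l.length) 0
      (List.mem_range.mpr hj) hne
  simpa [bInner, lcpAux_eq] using this

theorem bInner_le (l : List Char) (i : Nat) {c : Nat}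
    (h : ∀ j, j < l.length → j ≠ i → lcp (l.drop i) (l.drop j) ≤ c) :
    bInner l i ≤ c := by
  refine le_trans (le_of_eq ?_) (foldmax_le (fun j => lcpAux l i j 0) i (List.range l.length) 0 c
    (by omega) (fun j hj hne => by simpa [lcpAux_eq] using h j (List.mem_range.mp hj) hne))
  simp [bInner]

-- B's outer fold: a running minimum over the admissible starts
theorem bestfold_le_init (f w : Nat → Nat) (xs : List Nat) (b : Nat) :
    xs.foldl (fun b i => if f i ≤ w i then min b (f i) else b) b ≤ b := by
  induction xs generalizing b with
  | nil => simp
  | cons x xs ih =>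
    simp only [List.foldl_cons]
    refine le_trans (ih _) ?_
    split_ifs <;> omega

theorem bestfold_le (f w : Nat → Nat) (xs : List Nat) (b : Nat) {i : Nat}
    (hi : i ∈ xs) (hc : f i ≤ w i) :
    xs.foldl (fun b i => if f i ≤ w i then min b (f i) else b) b ≤ f i := by
  induction xs generalizing b with
  | nil => simp at hi
  | cons x xs ih =>
    simp only [List.foldl_cons]
    rcases List.mem_cons.mp hi with rfl | hi'
    · refine le_trans (bestfold_le_init f w xs _) ?_
      simp only [if_pos hc]
      omega
    · exact ih _ hi'

theorem bestfold_mem (f w : Nat → Nat) (xs : List Nat) (b : Nat) :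
    xs.foldl (fun b i => if f i ≤ w i then min b (f i) else b) b = b ∨
      ∃ i ∈ xs, f i ≤ w i ∧
        xs.foldl (fun b i => if f i ≤ w i then min b (f i) else b) b = f i := by
  induction xs generalizing b with
  | nil => left; simp
  | cons x xs ih =>
    simp only [List.foldl_cons]
    rcases ih (if f x ≤ w x then min b (f x) else b) with h | ⟨i, hi, hc, hv⟩
    · rw [h]
      split_ifs at h ⊢ with hx
      · rcases Nat.le_total b (f x) with hbf | hfb
        · left; omega
        · right; exact ⟨x, List.mem_cons_self, hx, by omega⟩
      · left; rfl
    · right; exact ⟨i, List.mem_cons_of_mem _ hi, hc, hv⟩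

theorem countP_range_eq_one {m : Nat} {p : Nat → Bool} :
    (List.range m).countP p = 1 ↔
      ∃ i, i < m ∧ p i = true ∧ ∀ j, j < m → j ≠ i → p j = false := by
  induction m with
  | zero => simp
  | succ m ih =>
    rw [List.range_succ, List.countP_append, List.countP_singleton]
    by_cases hp : p m = true
    · rw [if_pos hp]
      constructor
      · intro h
        have h0 : (List.range m).countP p = 0 := by omega
        rw [List.countP_eq_zero] at h0
        refine ⟨m, by omega, hp, fun j hj hne => ?_⟩
        have hjm : j < m := by omega
        have := h0 j (List.mem_range.mpr hjm)
        simpa using this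
      · rintro ⟨i, hi, hpi, hothers⟩
        have him : i = m := by
          by_contra hne
          have := hothers m (by omega) (fun hc => hne hc.symm)
          rw [this] at hp; simp at hp
        have h0 : (List.range m).countP p = 0 := by
          rw [List.countP_eq_zero]
          intro j hj
          have hjm := List.mem_range.mp hj
          have := hothers j (by omega) (by omega)
          simp [this]
        omega
    · rw [if_neg hp]
      simp only [Nat.add_zero]
      rw [ih]
      constructor
      · rintro ⟨i, hi, hpi, hothers⟩
        refine ⟨i, by omega, hpi, fun j hj hne => ?_⟩
        by_cases hjm : j = m
        · subst hjm; simpa using hp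
        · exact hothers j (by omega) hne
      · rintro ⟨i, hi, hpi, hothers⟩
        have him : i ≠ m := fun h => by subst h; rw [hpi] at hp; simp at hp
        refine ⟨i, by omega, hpi, fun j hj hne => hothers j (by omega) hne⟩

theorem aCond_iff (l : List Char) (k : Nat) (h2 : k ≤ l.length) :
    aCond l l.length ((k : Nat) : Int) = true ↔ hasUnique l k := by
  have hcast : ((l.length : Int)) - (k : Int) + 1 = ((l.length - k + 1 : Nat) : Int) := by omega
  simp only [aCond]
  rw [hcast, PySem.List.pyRange_zero_natCast, List.map_map]
  have hfun : ((fun i => PySem.List.slice l (some i) (some (i + (k : Int)))) ∘ fun j : Nat => (j : Int))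
      = fun j : Nat => subL l j k := by
    funext j
    simp only [Function.comp, subL]
    exact PySem.List.slice_natCast_add l j k
  rw [hfun, PySem.Dict.items_counter, List.any_map]
  rw [List.any_eq_true]
  constructor
  · rintro ⟨x, hx, hpx⟩
    rw [PySem.Set.mem_ofList] at hx
    simp only [Function.comp] at hpx
    have hcount : ((List.range (l.length - k + 1)).map (fun j => subL l j k)).count x = 1 := by
      have := beq_iff_eq.mp hpx
      exact_mod_cast this
    rw [List.count_eq_countP, List.countP_map] at hcount
    rw [countP_range_eq_one] at hcount
    obtain ⟨i, hi, hpi, hothers⟩ := hcount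
    have hxi : subL l i k = x := by simpa using hpi
    refine ⟨i, by omega, fun j hj hne => ?_⟩
    have hjm : j < l.length - k + 1 := by omega
    have := hothers j hjm hne
    simp only [Function.comp] at this
    intro hcontra
    rw [hcontra, hxi] at this
    simp at this
  · rintro ⟨i, hiL, hothers⟩
    refine ⟨subL l i k, ?_, ?_⟩
    · rw [PySem.Set.mem_ofList]
      exact List.mem_map.mpr ⟨i, List.mem_range.mpr (by omega), rfl⟩
    · simp only [Function.comp]
      have hcount : ((List.range (l.length - k + 1)).map (fun j => subL l j k)).count (subL l i k) = 1 := by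
        rw [List.count_eq_countP, List.countP_map, countP_range_eq_one]
        refine ⟨i, by omega, by simp, fun j hj hne => ?_⟩
        have := hothers j (by omega) hne
        simpa using this
      rw [hcount]
      simp

-- a valid candidate of B yields a unique substring
theorem unique_of_candidate (l : List Char) (i : Nat) (hi : i < l.length)
    (hc : bInner l i + 1 ≤ l.length - i) : uniqueAt l i (bInner l i + 1) := by
  set c := bInner l i + 1 with hcdef
  refine ⟨by omega, fun j hj hne hcontra => ?_⟩
  have hlen_i : c ≤ (l.drop i).length := by simp [List.length_drop]; omega
  have hlen_j : c ≤ (l.drop j).length := by simp [List.length_drop]; omega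
  have hlcp : c ≤ lcp (l.drop i) (l.drop j) := by
    refine le_lcp_of_take_eq hlen_i hlen_j ?_
    simpa [subL] using hcontra.symm
  have hjn : j < l.length := by omega
  have := bInner_ge l i hjn hne
  omega

-- a unique substring bounds B's candidate at its start
theorem candidate_of_unique (l : List Char) (i L : Nat) (hL : 1 ≤ L)
    (hu : uniqueAt l i L) : i < l.length ∧ bInner l i + 1 ≤ L ∧ bInner l i + 1 ≤ l.length - i := by
  obtain ⟨hiL, hothers⟩ := hu
  have hin : i < l.length := by omega
  have hb : bInner l i ≤ L - 1 := by
    refine bInner_le l i (fun j hj hne => ?_)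
    by_contra hgt
    have hlcp : L ≤ lcp (l.drop i) (l.drop j) := by omega
    have hjL : j + L ≤ l.length := by
      have := lcp_le_right (l.drop i) (l.drop j)
      simp [List.length_drop] at this
      omega
    have heq : (l.drop i).take L = (l.drop j).take L := take_eq_of_le_lcp hlcp
    exact hothers j hjL hne (by simpa [subL] using heq.symm) 
  omega

-- the full string is always a unique substring of itself
theorem unique_full (l : List Char) : uniqueAt l 0 l.length := by
  refine ⟨by omega, fun j hj hne => ?_⟩
  omega

theorem pyRange_one_eq (n : Nat) :
    PySem.List.pyRange 1 ((n : Int) + 1) = (List.range n).map (fun k : Nat => ((k : Int) + 1)) := by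
  induction n with
  | zero => decide
  | succ m ih =>
    have hc : ((m + 1 : Nat) : Int) + 1 = ((m : Int) + 1) + 1 := by push_cast; ring
    rw [hc, PySem.List.pyRange_one_succ_right (by omega), ih, List.range_succ, List.map_append]
    simp

theorem aLoop_eq_find? (l : List Char) (n : Nat) (xs : List Int) :
    aLoop l n xs = xs.find? (aCond l n) := by
  induction xs with
  | nil => rfl
  | cons x xs ih => simp only [aLoop, List.find?_cons]; split_ifs with h <;> simp_all

-- characterization of B's result for a nonempty string
theorem bRes_spec (l : List Char) (hn : 1 ≤ l.length) :
    hasUnique l ((List.range l.length).foldl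
        (fun best i => if bInner l i + 1 ≤ l.length - i then min best (bInner l i + 1) else best)
        l.length) ∧
      1 ≤ ((List.range l.length).foldl
        (fun best i => if bInner l i + 1 ≤ l.length - i then min best (bInner l i + 1) else best)
        l.length) ∧
      ∀ L, 1 ≤ L → hasUnique l L →
        ((List.range l.length).foldl
          (fun best i => if bInner l i + 1 ≤ l.length - i then min best (bInner l i + 1) else best)
          l.length) ≤ L := by
  refine ⟨?_, ?_, ?_⟩
  · rcases bestfold_mem (fun i => bInner l i + 1) (fun i => l.length - i) (List.range l.length)
        l.length with h | ⟨i, hi, hc, hv⟩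
    · rw [h]; exact ⟨0, unique_full l⟩
    · rw [hv]
      exact ⟨i, unique_of_candidate l i (List.mem_range.mp hi) hc⟩
  · rcases bestfold_mem (fun i => bInner l i + 1) (fun i => l.length - i) (List.range l.length)
        l.length with h | ⟨i, hi, hc, hv⟩
    · omega
    · omega
  · intro L hL ⟨i, hu⟩
    obtain ⟨hin, hb, hw⟩ := candidate_of_unique l i L hL hu
    have := bestfold_le (fun i => bInner l i + 1) (fun i => l.length - i) (List.range l.length)
        l.length (List.mem_range.mpr hin) hw
    simp only [] at this
    omega

-- ===== VERDICT (the statement is the Claim_ definition above) =====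
theorem solution_easier_spec : Claim_equal_solution_easier := by
  intro S _
  unfold Spec_solution_easier
  simp only [solution_easier, solution_easier_alt]
  set l := S.toList with hl
  by_cases h0 : l.length = 0
  · have hnil : l = [] := List.eq_nil_of_length_eq_zero h0
    rw [hnil]
    simp [aLoop]
  · have hn : 1 ≤ l.length := by omega
    obtain ⟨hru, hr1, hrmin⟩ := bRes_spec l hn
    set r := (List.range l.length).foldl
        (fun best i => if bInner l i + 1 ≤ l.length - i then min best (bInner l i + 1) else best)
        l.length with hrdef
    have hrn : r ≤ l.length := hrmin l.length hn ⟨0, unique_full l⟩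
    by_cases h1 : l.length = 1
    · rw [if_pos h1]
      have hr_le : r ≤ 1 := hrmin 1 le_rfl ⟨0, by rw [← h1]; exact unique_full l⟩
      have : r = 1 := by omega
      rw [this]
      rfl
    · rw [if_neg h1]
      rw [aLoop_eq_find?, pyRange_one_eq, List.find?_map]
      have hq : ∀ k : Nat, k < l.length →
          ((aCond l l.length ∘ fun k : Nat => (k : Int) + 1) k = true ↔ hasUnique l (k + 1)) := by
        intro k hk
        have hc : ((k : Int) + 1) = ((k + 1 : Nat) : Int) := by push_cast; ring
        simp only [Function.comp, hc]
        exact aCond_iff l (k + 1) (by omega)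
      have hfind : (List.range l.length).find? (aCond l l.length ∘ fun k : Nat => (k : Int) + 1) ≠ none := by
        intro hcontra
        rw [List.find?_eq_none] at hcontra
        have hrm : r - 1 ∈ List.range l.length := List.mem_range.mpr (by omega)
        exact hcontra _ hrm ((hq (r - 1) (by omega)).mpr (by
          have : r - 1 + 1 = r := by omega
          rw [this]; exact hru))
      cases hfd : (List.range l.length).find? (aCond l l.length ∘ fun k : Nat => (k : Int) + 1) with
      | none => exact absurd hfd hfind
      | some k0 =>
        show ((k0 : Int) + 1) = (r : Int)
        rw [List.find?_eq_some_iff_getElem] at hfd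
        obtain ⟨hpk0, i, hilt, hgete, hprev⟩ := hfd
        rw [List.getElem_range] at hgete
        subst hgete
        have hk0n : i < l.length := by simpa using hilt
        have hle1 : r ≤ i + 1 := hrmin (i + 1) (by omega) ((hq i hk0n).mp hpk0)
        have hle2 : i + 1 ≤ r := by
          by_contra hlt
          have hr1k : r - 1 < i := by omega
          have := hprev (r - 1) (by simpa using hr1k)
          rw [List.getElem_range] at this
          have hqr : (aCond l l.length ∘ fun k : Nat => (k : Int) + 1) (r - 1) = true := by
            refine (hq (r - 1) (by omega)).mpr ?_
            have : r - 1 + 1 = r := by omega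
            rw [this]; exact hru
          rw [hqr] at this
          simp at this
        have : r = i + 1 := by omega
        rw [this]
        push_cast
        ring
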